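-- pv_equiv track=rewrite | github.com/palak-goel/Country-Development | pca/pca.py | generate_data_matrix_for_imputation
-- ===== SOURCE A (Python) =====
-- def indicator_count_per_country(map_of_maps):
--     metadata = {}
--     for key in map_of_maps:
--         metadata[key] = len(map_of_maps[key].items())
--     return metadata
--
-- def indicator_count_per_indicator(map_of_maps):
--     metadata = {}
--     for key in map_of_maps:
--         curr_map = map_of_maps[key]
--         for key in curr_map:
--             metadata[key] = metadata.get(key, 0) + 1
--     return metadata
--
-- def create_indicator_mapping(icpi):
--     imap = {}
--     for p, key in enumerate(icpi.keys()):
--         imap[key] = p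
--     return imap
--
-- def generate_data_matrix_for_imputation(map_of_maps):
--     icpc = indicator_count_per_country(map_of_maps)
--     icpi = indicator_count_per_indicator(map_of_maps)
--     imap = create_indicator_mapping(icpi)
--     num_indicators = len(imap.keys())
--     info_matrix = []
--     keys_used = []
--     for key in map_of_maps:
--         keys_used.append(key)
--         curr_map = map_of_maps[key]
--         row = ["" for i in range(num_indicators)]
--         for indicator in curr_map:
--             row[imap[indicator]] = str(curr_map.get(indicator, ""))
--         info_matrix.append(row)
--     return info_matrix, imap, keys_used
-- ===== SOURCE B (Python) =====
-- def generate_data_matrix_for_imputation(map_of_maps):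
--     # gather-style rebuild: ordered first-appearance indicator list, then each row
--     # is produced by iterating that list with a membership test (no preallocated
--     # ''-row scatter, no per-country/per-indicator count dicts).
--     ind_list = []
--     seen = set()
--     for curr_map in map_of_maps.values():
--         for ind in curr_map:
--             if ind not in seen:
--                 seen.add(ind)
--                 ind_list.append(ind)
--     imap = {ind: p for p, ind in enumerate(ind_list)}
--     keys_used = list(map_of_maps)
--     info_matrix = [[str(curr_map[ind]) if ind in curr_map else "" for ind in ind_list]
--                    for curr_map in map_of_maps.values()]
--     return info_matrix, imap, keys_used
-- ===== Notes on version B (the rewrite author's own statement) =====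
-- stated objective: simpler
-- what changed: Builds the first-appearance indicator list with a seen-set in one pass (instead of deriving it from a per-indicator count dict) and builds each row by gathering over that list with a membership test, instead of A's scatter into a preallocated ''-row; the unused per-country count dict is dropped.
import Mathlib
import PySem

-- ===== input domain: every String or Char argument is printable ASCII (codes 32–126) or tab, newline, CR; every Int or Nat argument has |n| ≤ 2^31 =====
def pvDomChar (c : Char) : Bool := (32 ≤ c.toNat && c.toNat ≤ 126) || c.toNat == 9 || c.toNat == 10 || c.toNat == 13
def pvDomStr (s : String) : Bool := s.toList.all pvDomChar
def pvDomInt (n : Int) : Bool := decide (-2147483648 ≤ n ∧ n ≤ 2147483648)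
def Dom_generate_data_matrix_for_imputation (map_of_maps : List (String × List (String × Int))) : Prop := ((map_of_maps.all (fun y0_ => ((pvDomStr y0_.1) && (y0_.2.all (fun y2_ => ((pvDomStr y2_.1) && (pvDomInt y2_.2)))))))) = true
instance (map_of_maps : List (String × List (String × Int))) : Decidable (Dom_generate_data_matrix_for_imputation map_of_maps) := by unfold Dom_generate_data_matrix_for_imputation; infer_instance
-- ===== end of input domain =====

-- B replaces A's scatter-into-a-preallocated-''-row (positions from a count-dict-derived index map)
-- by a first-appearance indicator list built with a seen-set and a gather pass per row; same result, same cost (objective: simpler).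

-- ===== PORT A =====
-- dicts are ported as PySem.Dict / association lists; 'for key in map_of_maps' iterates the pairs.
def generate_data_matrix_for_imputation (map_of_maps : List (String × List (String × Int))) : List (List String) × (List (String × Int)) × List String :=
  -- icpc = indicator_count_per_country(map_of_maps): computed and never used, as in A
  let _icpc : PySem.Dict String Int :=
    map_of_maps.foldl (fun d p => d.insert p.1 (p.2.length : Int)) PySem.Dict.empty
  -- icpi = indicator_count_per_indicator(map_of_maps)
  let icpi : PySem.Dict String Int :=
    map_of_maps.foldl (fun d p => p.2.foldl (fun d q => d.modify q.1 0 (· + 1)) d) PySem.Dict.empty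
  -- imap = create_indicator_mapping(icpi)
  let imap : PySem.Dict String Int :=
    (PySem.List.enumerate icpi.keys).foldl (fun d e => d.insert e.2 e.1) PySem.Dict.empty
  let num_indicators := imap.keys.length
  -- main loop; row[imap[indicator]] = str(curr_map.get(indicator, "")): the key 'indicator' is always
  -- present in imap (it was counted in icpi), so imap[indicator] is its value (ported getD with unused
  -- default); curr_map.get(indicator, "") is the value q.2 of the pair being iterated (dict keys unique).
  let st := map_of_maps.foldl (fun st p =>
      (st.1 ++ [p.2.foldl (fun row q => row.set (imap.getD q.1 0).toNat (PySem.Int.toStr q.2))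
                  (List.replicate num_indicators "")],
       st.2 ++ [p.1]))
    (([] : List (List String)), ([] : List String))
  (st.1, imap.items, st.2)

-- ===== PORT B =====
-- seen-set + first-appearance append list is exactly PySem.Set (ordered distinct elements).
def generate_data_matrix_for_imputation_alt (map_of_maps : List (String × List (String × Int))) : List (List String) × (List (String × Int)) × List String :=
  let ind_list : PySem.Set String :=
    map_of_maps.foldl (fun s p => PySem.Set.update s (p.2.map (·.1))) PySem.Set.empty
  let imap : List (String × Int) := (PySem.List.enumerate ind_list).map (fun e => (e.2, e.1))
  let keys_used : List String := map_of_maps.map (·.1)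
  let info_matrix : List (List String) := map_of_maps.map (fun p =>
    ind_list.map (fun ind =>
      match (PySem.Dict.mk p.2).get? ind with
      | some v => PySem.Int.toStr v
      | none => ""))
  (info_matrix, imap, keys_used)

-- ===== PRECONDITION & SPEC =====
-- Pre_ excludes association lists with duplicate keys (outer or inner): those do not represent any
-- Python dict (a dict cannot hold duplicate keys), so A never receives them.
def Pre_generate_data_matrix_for_imputation (map_of_maps : List (String × List (String × Int))) : Prop :=
  (map_of_maps.map (·.1)).Nodup ∧ ∀ p ∈ map_of_maps, (p.2.map (·.1)).Nodup
instance (map_of_maps : List (String × List (String × Int))) : Decidable (Pre_generate_data_matrix_for_imputation map_of_maps) := by unfold Pre_generate_data_matrix_for_imputation; infer_instance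
def pvWitness_generate_data_matrix_for_imputation : (List (String × List (String × Int))) :=
  [("us", [("gdp", 3), ("pop", 7)]), ("fr", [("pop", 2)])]
def Spec_generate_data_matrix_for_imputation (map_of_maps : List (String × List (String × Int))) (out : List (List String) × (List (String × Int)) × List String) : Prop := out = generate_data_matrix_for_imputation_alt map_of_maps
instance (map_of_maps : List (String × List (String × Int))) (out : List (List String) × (List (String × Int)) × List String) : Decidable (Spec_generate_data_matrix_for_imputation map_of_maps out) := by unfold Spec_generate_data_matrix_for_imputation; infer_instance

-- ===== CLAIM (what is proved, stated in full; the proofs are below) =====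
def Claim_equal_generate_data_matrix_for_imputation : Prop := ∀ (map_of_maps : List (String × List (String × Int))), Dom_generate_data_matrix_for_imputation map_of_maps → Pre_generate_data_matrix_for_imputation map_of_maps → Spec_generate_data_matrix_for_imputation map_of_maps (generate_data_matrix_for_imputation map_of_maps)

-- ===== LEMMAS AND PROOFS =====

-- the first-appearance indicator list both ports are organised around
def pvK (map_of_maps : List (String × List (String × Int))) : List String :=
  map_of_maps.foldl (fun s p => PySem.Set.update s (p.2.map (·.1))) []

theorem pvK_keys_icpi (mm : List (String × List (String × Int))) :
    ∀ d : PySem.Dict String Int,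
      (mm.foldl (fun d p => p.2.foldl (fun d q => d.modify q.1 0 (· + 1)) d) d).keys
        = mm.foldl (fun s p => PySem.Set.update s (p.2.map (·.1))) d.keys := by
  induction mm with
  | nil => intro d; rfl
  | cons p mm ih =>
      intro d
      simp only [List.foldl_cons]
      rw [ih]
      congr 1
      exact PySem.Dict.keys_foldl_modify_key p.2 (·.1) 0 (fun _ _ => (· + 1)) d

theorem pvK_nodup (mm : List (String × List (String × Int))) :
    ∀ s : PySem.Set String, s.Nodup →
      (mm.foldl (fun s p => PySem.Set.update s (p.2.map (·.1))) s).Nodup := by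
  induction mm with
  | nil => intro s hs; exact hs
  | cons p mm ih => intro s hs; exact ih _ (PySem.Set.nodup_update s _ hs)

theorem pvK_mono (mm : List (String × List (String × Int))) :
    ∀ (s : PySem.Set String) (x : String), x ∈ s →
      x ∈ mm.foldl (fun s p => PySem.Set.update s (p.2.map (·.1))) s := by
  induction mm with
  | nil => intro s x hx; exact hx
  | cons p mm ih =>
      intro s x hx
      exact ih _ x ((PySem.Set.mem_update _ _ _).mpr (Or.inl hx))

theorem pvK_mem (mm : List (String × List (String × Int))) :
    ∀ (s : PySem.Set String) (p : String × List (String × Int)) (q : String × Int),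
      p ∈ mm → q ∈ p.2 →
      q.1 ∈ mm.foldl (fun s p => PySem.Set.update s (p.2.map (·.1))) s := by
  induction mm with
  | nil => intro _ _ _ h; cases h
  | cons p0 mm ih =>
      intro s p q hp hq
      rcases List.mem_cons.mp hp with h | h
      · subst h
        exact pvK_mono mm _ _ ((PySem.Set.mem_update _ _ _).mpr
          (Or.inr (List.mem_map.mpr ⟨q, hq, rfl⟩)))
      · exact ih _ p q h hq

theorem get?_mk_eq_find? (cm : List (String × Int)) (k : String) :
    (PySem.Dict.mk cm).get? k = (cm.find? (fun q => q.1 == k)).map (·.2) := by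
  induction cm with
  | nil => rfl
  | cons q cm ih =>
      rw [show PySem.Dict.mk (q :: cm) = PySem.Dict.mk ((q.1, q.2) :: cm) by rfl]
      rw [PySem.Dict.get?_mk_cons, List.find?_cons]
      by_cases h : q.1 == k
      · simp [h]
      · simp only [h, Bool.false_eq_true, if_false]
        exact ih

theorem find?_congr_mem {α : Type} (l : List α) (p p' : α → Bool)
    (h : ∀ x ∈ l, p x = p' x) : l.find? p = l.find? p' := by
  induction l with
  | nil => rfl
  | cons x l ih =>
      rw [List.find?_cons, List.find?_cons, h x List.mem_cons_self,
        ih (fun y hy => h y (List.mem_cons_of_mem x hy))]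

theorem scatter_length (cm : List (String × Int)) (f : String → Nat) :
    ∀ row : List String,
      (cm.foldl (fun r q => r.set (f q.1) (PySem.Int.toStr q.2)) row).length = row.length := by
  induction cm with
  | nil => intro row; rfl
  | cons q cm ih =>
      intro row
      simp only [List.foldl_cons]
      rw [ih]
      exact List.length_set ..

theorem scatter_get? (cm : List (String × Int)) (idx : String → Nat) :
    ∀ (row : List String) (j : Nat), j < row.length →
      (cm.map (fun q => idx q.1)).Nodup →
      (cm.foldl (fun r q => r.set (idx q.1) (PySem.Int.toStr q.2)) row)[j]?
        = match cm.find? (fun q => idx q.1 == j) with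
          | some q => some (PySem.Int.toStr q.2)
          | none => row[j]? := by
  induction cm with
  | nil => intro row j hj _; rfl
  | cons q cm ih =>
      intro row j hj hnd
      simp only [List.foldl_cons, List.find?_cons]
      have hlen : (row.set (idx q.1) (PySem.Int.toStr q.2)).length = row.length :=
        List.length_set ..
      rw [List.map_cons, List.nodup_cons] at hnd
      by_cases h : idx q.1 = j
      · have hnone : cm.find? (fun q' => idx q'.1 == j) = none := by
          apply List.find?_eq_none.mpr
          intro q' hq'
          simp only [beq_iff_eq]
          intro hc
          exact hnd.1 (h ▸ hc ▸ List.mem_map.mpr ⟨q', hq', rfl⟩)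
        rw [ih _ j (hlen ▸ hj) hnd.2, hnone]
        simp only [h, beq_self_eq_true]
        rw [List.getElem?_set_self]
        simp [hj]
      · have hb : (idx q.1 == j) = false := by simpa using h
        rw [hb, ih _ j (hlen ▸ hj) hnd.2]
        cases hf : cm.find? (fun q' => idx q'.1 == j) with
        | some q' => simp
        | none => simp only; rw [List.getElem?_set_ne h]

theorem row_eq (K : List String) (hK : K.Nodup) (cm : List (String × Int))
    (hnd : (cm.map (·.1)).Nodup) (hsub : ∀ q ∈ cm, q.1 ∈ K) :
    cm.foldl (fun r q => r.set (K.idxOf q.1) (PySem.Int.toStr q.2)) (List.replicate K.length "")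
      = K.map (fun ind =>
          match (PySem.Dict.mk cm).get? ind with
          | some v => PySem.Int.toStr v
          | none => "") := by
  apply List.ext_getElem?
  intro j
  by_cases hj : j < K.length
  · have hidxnd : (cm.map (fun q => K.idxOf q.1)).Nodup := by
      rw [show (fun q : String × Int => K.idxOf q.1) = (fun k => K.idxOf k) ∘ (·.1) from rfl,
        ← List.map_map]
      refine (List.nodup_map_iff_inj_on hnd).mpr ?_
      intro a ha b hb hab
      have ha' : a ∈ K := by
        rcases List.mem_map.mp ha with ⟨q, hq, rfl⟩; exact hsub q hq
      have hb' : b ∈ K := by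
        rcases List.mem_map.mp hb with ⟨q, hq, rfl⟩; exact hsub q hq
      calc a = K[K.idxOf a]'(List.idxOf_lt_length_of_mem ha') := (List.getElem_idxOf _).symm
        _ = K[K.idxOf b]'(hab ▸ List.idxOf_lt_length_of_mem ha') := by simp only [hab]
        _ = b := List.getElem_idxOf _
    rw [scatter_get? cm (fun k => K.idxOf k) _ j (by simpa using hj) hidxnd]
    have hfc : cm.find? (fun q => K.idxOf q.1 == j) = cm.find? (fun q => q.1 == K[j]'hj) := by
      apply find?_congr_mem
      intro q hq
      have hqK : q.1 ∈ K := hsub q hq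
      have : (K.idxOf q.1 = j) ↔ (q.1 = K[j]'hj) := by
        constructor
        · intro h
          conv_lhs => rw [← List.getElem_idxOf (List.idxOf_lt_length_of_mem hqK)]
          simp only [h]
        · intro h; rw [h]; exact hK.idxOf_getElem j hj
      simp [this]
    rw [hfc, List.getElem?_map, List.getElem?_replicate, if_pos hj,
      show K[j]? = some (K[j]'hj) from List.getElem?_eq_getElem hj]
    simp only [Option.map_some]
    rw [get?_mk_eq_find?]
    cases cm.find? (fun q => q.1 == K[j]'hj) with
    | some q => rfl
    | none => rfl
  · have h1 : K.length ≤ j := Nat.le_of_not_lt hj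
    rw [List.getElem?_eq_none (by
        rw [scatter_length cm (fun k => List.idxOf k K) (List.replicate K.length "")]
        simpa using h1),
      List.getElem?_eq_none (by simpa using h1)]

theorem imap_items (K : List String) (hK : K.Nodup) :
    ((PySem.List.enumerate K).foldl (fun d e => d.insert e.2 e.1) PySem.Dict.empty).items
      = (PySem.List.enumerate K).map (fun e => (e.2, e.1)) := by
  rw [PySem.Dict.items_foldl_insert_fresh (PySem.List.enumerate K) (·.2) (·.1) PySem.Dict.empty
    (by intro a _; simp [PySem.Dict.contains_empty])
    (by rw [PySem.List.map_snd_enumerate]; exact hK)]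
  simp [PySem.Dict.empty]

theorem imap_keys (K : List String) (hK : K.Nodup) :
    ((PySem.List.enumerate K).foldl (fun d e => d.insert e.2 e.1) PySem.Dict.empty).keys = K := by
  simp only [PySem.Dict.keys, imap_items K hK, List.map_map]
  rw [show ((fun p : String × Int => p.1) ∘ fun e : Int × String => (e.2, e.1))
      = (fun e : Int × String => e.2) from rfl]
  exact PySem.List.map_snd_enumerate K 0

theorem imap_getD (K : List String) (hK : K.Nodup) (k : String) (hk : k ∈ K) :
    ((PySem.List.enumerate K).foldl (fun d e => d.insert e.2 e.1) PySem.Dict.empty).getD k 0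
      = (List.idxOf k K : Int) := by
  apply PySem.Dict.getD_of_mem_items
  · rw [imap_items K hK]
    have hj : List.idxOf k K < K.length := List.idxOf_lt_length_of_mem hk
    have hj' : List.idxOf k K < (PySem.List.enumerate K).length := by
      simpa [PySem.List.length_enumerate] using hj
    refine List.mem_map.mpr ⟨(PySem.List.enumerate K)[List.idxOf k K]'hj', List.getElem_mem _, ?_⟩
    rw [PySem.List.getElem_enumerate K 0 _ hj']
    simp [List.getElem_idxOf hj]
  · rw [imap_keys K hK]; exact hK

-- ===== VERDICT (by name: the statement is the Claim_ definition above) =====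
theorem generate_data_matrix_for_imputation_spec : Claim_equal_generate_data_matrix_for_imputation := by
  intro mm _hdom hpre
  obtain ⟨_houter, hinner⟩ := hpre
  unfold Spec_generate_data_matrix_for_imputation
  simp only [generate_data_matrix_for_imputation, generate_data_matrix_for_imputation_alt]
  have hkeys : (mm.foldl (fun d p => p.2.foldl (fun d q => d.modify q.1 0 (· + 1)) d)
        (PySem.Dict.empty : PySem.Dict String Int)).keys
      = mm.foldl (fun s p => PySem.Set.update s (p.2.map (·.1))) PySem.Set.empty := by
    rw [pvK_keys_icpi]; rfl
  rw [hkeys]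
  have hK : (mm.foldl (fun s p => PySem.Set.update s (p.2.map (·.1))) PySem.Set.empty).Nodup :=
    pvK_nodup mm PySem.Set.empty List.nodup_nil
  have hmem : ∀ p ∈ mm, ∀ q ∈ p.2,
      q.1 ∈ mm.foldl (fun s p => PySem.Set.update s (p.2.map (·.1))) PySem.Set.empty :=
    fun p hp q hq => pvK_mem mm PySem.Set.empty p q hp hq
  set K := mm.foldl (fun s p => PySem.Set.update s (p.2.map (·.1))) PySem.Set.empty with hKdef
  set impd := (PySem.List.enumerate K).foldl (fun d e => d.insert e.2 e.1) PySem.Dict.empty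
    with himpd
  have hsplit := PySem.List.foldl_prod_mk
    (fun (a : List (List String)) (p : String × List (String × Int)) => a ++ [p.2.foldl
      (fun row q => row.set (impd.getD q.1 0).toNat (PySem.Int.toStr q.2))
      (List.replicate impd.keys.length "")])
    (fun (a : List String) (p : String × List (String × Int)) => a ++ [p.1]) mm [] []
  simp only at hsplit
  rw [hsplit]
  rw [PySem.List.foldl_append_singleton_eq_map, PySem.List.foldl_append_singleton_eq_map]
  simp only [Prod.mk.injEq, List.nil_append]
  refine ⟨?_, imap_items K hK, trivial⟩
  apply List.map_congr_left
  intro p hp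
  rw [imap_keys K hK]
  rw [PySem.List.foldl_congr_mem p.2 _
    (fun row q => row.set (List.idxOf q.1 K) (PySem.Int.toStr q.2)) _
    (by
      intro acc q hq
      rw [imap_getD K hK q.1 (hmem p hp q hq)]
      simp)]
  exact row_eq K hK p.2 (hinner p hp) (fun q hq => hmem p hp q hq)
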